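-- pv_equiv track=rewrite | github.com/manwar/perlweeklychallenge-club | challenge-314/ashwin-shenoy/python/ch-2.py | solution
-- ===== SOURCE A (Python) =====
-- def solution(string_list: list[str]) -> int:
--     """Solution to task 2.
--
--     Title: "Sort Column"
--
--     You are given a list of strings of same length.
--     Write a script to make each column sorted lexicographically by deleting any non sorted columns.
--     Return the total columns deleted.
--
--     URL: https://theweeklychallenge.org/blog/perl-weekly-challenge-314/
--
--     Algorithm details:
--
--         Time complexity:
--
--             - Best case scenario    : O(NM)
--             - Worst case scenario   : O(NM)
--             - Average case scenario : O(NM)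
--
--         Space complexity:
--
--             - Best case scenario    : O(N)
--             - Worst case scenario   : O(N)
--             - Average case scenario : O(N)
--
--         where N = Length of the string.
--               M = Number of strings.
--
--     Args:
--         string_list: A list of strings (of equal lengths).
--
--     Returns:
--         The number of columns to be deleted to make the remaining string "columns"
--         lexicographically sorted.
--     """
--     num_columns_deleted = 0
--
--     for idx in range(len(string_list[0])):
--         temp_string_list = []
--
--         for string in string_list:
--             temp_string_list.append(string[idx])
--
--         if not (temp_string_list == sorted(temp_string_list)):
--             num_columns_deleted += 1
--
--     return num_columns_deleted
-- ===== SOURCE B (Python) =====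
-- def solution(string_list: list[str]) -> int:
--     """Count columns not lexicographically sorted, by scanning adjacent rows per column (no sorting)."""
--     pairs = list(zip(string_list, string_list[1:]))
--     return sum(1 for idx in range(len(string_list[0]))
--                if any(a[idx] > b[idx] for a, b in pairs))
-- ===== Notes on version B (the rewrite author's own statement) =====
-- stated objective: alternative
-- what changed: Instead of materialising each column and comparing it with its sorted copy, B checks each column directly by scanning adjacent row pairs for a descending pair of characters (with any's early exit), removing the per-column sort; it trades the sort for pure Python char comparisons, which is not measurably faster.
import Mathlib
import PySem

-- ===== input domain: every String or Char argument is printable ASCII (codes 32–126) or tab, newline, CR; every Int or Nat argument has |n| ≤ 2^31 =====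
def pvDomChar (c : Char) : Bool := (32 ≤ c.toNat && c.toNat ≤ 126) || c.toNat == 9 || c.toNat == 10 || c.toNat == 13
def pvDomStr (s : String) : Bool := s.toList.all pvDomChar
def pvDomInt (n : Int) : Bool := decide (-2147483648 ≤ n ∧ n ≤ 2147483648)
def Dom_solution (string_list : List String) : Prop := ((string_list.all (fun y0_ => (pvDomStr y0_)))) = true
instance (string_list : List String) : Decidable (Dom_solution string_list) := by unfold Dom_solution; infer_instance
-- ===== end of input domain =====

-- B replaces A's per-column "build the column and compare with its sorted copy" by a direct
-- adjacent-pair descent scan per column, removing the sort (alternative algorithm, similar cost).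

-- ===== PORT A =====
-- string[idx] is in range for every index the loop visits whenever Pre_ holds; the
-- `.getD ' '` default is never used inside Pre_ (Python would raise IndexError there).
def solution (string_list : List String) : Int :=
  (PySem.List.pyRange 0 (PySem.Str.len (string_list.headD "")) 1).foldl
    (fun num_columns_deleted idx =>
      let temp_string_list : List Char :=
        string_list.foldl (fun ts s => ts ++ [(PySem.Str.pyGet? s idx).getD ' ']) []
      if ¬ (temp_string_list = PySem.List.sorted temp_string_list (fun c => c) false) then
        num_columns_deleted + 1
      else num_columns_deleted) 0

-- ===== PORT B =====
def solution_alt (string_list : List String) : Int :=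
  let pairs := string_list.zip string_list.tail
  ((PySem.List.pyRange 0 (PySem.Str.len (string_list.headD "")) 1).countP
    (fun idx => pairs.any (fun p =>
      decide ((PySem.Str.pyGet? p.2 idx).getD ' ' < (PySem.Str.pyGet? p.1 idx).getD ' '))) : Int)

-- ===== PRECONDITION & SPEC =====
-- A raises IndexError on the empty list (string_list[0]) and whenever some string is shorter
-- than the first one; Pre_ excludes exactly those inputs.
def Pre_solution (string_list : List String) : Prop :=
  string_list ≠ [] ∧ ∀ s ∈ string_list, (string_list.headD "").toList.length ≤ s.toList.length
instance (string_list : List String) : Decidable (Pre_solution string_list) := by unfold Pre_solution; infer_instance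
def pvWitness_solution : List String := ["ba", "ab"]

def Spec_solution (string_list : List String) (out : Int) : Prop := out = solution_alt string_list
instance (string_list : List String) (out : Int) : Decidable (Spec_solution string_list out) := by unfold Spec_solution; infer_instance

-- ===== CLAIM (what is proved, stated in full; the proofs are below) =====
def Claim_equal_solution : Prop := ∀ (string_list : List String), Dom_solution string_list → Pre_solution string_list → Spec_solution string_list (solution string_list)

-- ===== LEMMAS AND PROOFS =====

-- adjacent-pair reading of a chain
theorem isChain_iff_zip_tail {α : Type} (r : α → α → Prop) (l : List α) :
    List.IsChain r l ↔ ∀ p ∈ l.zip l.tail, r p.1 p.2 := by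
  induction l with
  | nil => simp
  | cons a t ih =>
    cases t with
    | nil => simp
    | cons b u =>
      rw [List.isChain_cons_cons]
      simp only [List.tail_cons, List.zip_cons_cons, List.mem_cons, forall_eq_or_imp]
      rw [ih]
      simp

-- A's per-column test: the column equals its sorted copy iff it is pairwise ≤
theorem eq_sorted_iff_pairwise (l : List Char) :
    l = PySem.List.sorted l (fun c => c) false ↔ l.Pairwise (· ≤ ·) := by
  constructor
  · intro h
    have := PySem.List.sorted_pairwise l (fun c => c) (κ := Char)
    rw [← h] at this
    exact this
  · intro h
    exact (PySem.List.sorted_eq_self_of_pairwise l (fun c => c) h).symm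

-- per-column agreement of the two tests
theorem column_test_agree (l : List String) (idx : Int)
    (c : String → Char) (hc : ∀ s, c s = (PySem.Str.pyGet? s idx).getD ' ') :
    (¬ (l.map c = PySem.List.sorted (l.map c) (fun x => x) false)) ↔
      ((l.zip l.tail).any (fun p =>
        decide ((PySem.Str.pyGet? p.2 idx).getD ' ' < (PySem.Str.pyGet? p.1 idx).getD ' ')) = true) := by
  rw [eq_sorted_iff_pairwise, ← List.isChain_iff_pairwise, ← List.isChain_map,
      isChain_iff_zip_tail]
  push_neg
  simp only [List.any_eq_true, decide_eq_true_eq, List.map_id', List.map_id, ← List.map_tail,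
    List.zip_map, List.mem_map]
  constructor
  · rintro ⟨q, ⟨p, hp, rfl⟩, h⟩
    exact ⟨p, hp, by simpa [hc, Prod.map] using h⟩
  · rintro ⟨p, hp, h⟩
    exact ⟨Prod.map c c p, ⟨p, hp, rfl⟩, by simpa [hc, Prod.map] using h⟩

-- ===== VERDICT (by name: the statement is the Claim_ definition above) =====
theorem solution_spec : Claim_equal_solution := by
  intro l _ _
  unfold Spec_solution solution solution_alt
  rw [PySem.List.foldl_ite_add_one
        (fun idx => ¬ (l.foldl (fun ts s => ts ++ [(PySem.Str.pyGet? s idx).getD ' ']) [] =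
          PySem.List.sorted (l.foldl (fun ts s => ts ++ [(PySem.Str.pyGet? s idx).getD ' ']) []) (fun c => c) false))]
  rw [zero_add]
  congr 1
  apply List.countP_congr
  intro idx _
  have hfold : ∀ i : Int, l.foldl (fun ts s => ts ++ [(PySem.Str.pyGet? s i).getD ' ']) [] =
      l.map (fun s => (PySem.Str.pyGet? s i).getD ' ') := by
    intro i
    simpa using PySem.List.foldl_append_singleton_eq_map (f := fun s => (PySem.Str.pyGet? s i).getD ' ') (l := l) (acc := [])
  simp only [hfold]
  rw [decide_eq_true_eq]
  exact column_test_agree l idx (fun s => (PySem.Str.pyGet? s idx).getD ' ') (fun _ => rfl)
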